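-- pv_equiv track=rewrite | github.com/Aldrin-Shanty/image-caption-generator | Toxic_Classify_DA_Project/app.py | remove_punc_dig
-- ===== SOURCE A (Python) =====
-- import string
--
-- def remove_punc_dig(text):
--     '''
--     text : str
--     This function will remove all the punctuations and digits from the "text"
--     '''
--     if not isinstance(text, str):
--         return ""
--
--     to_remove = string.punctuation + string.digits
--     cur_text = ""
--     for i in range(len(text)):
--         if text[i] in to_remove:
--             cur_text += " "
--         else:
--             cur_text += text[i].lower()
--     cur_text = " ".join(cur_text.split())
--     return cur_text
-- ===== SOURCE B (Python) =====
-- import string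
--
-- def remove_punc_dig(text):
--     '''
--     text : str
--     Removes punctuation/digits, lowercases and collapses whitespace: one
--     scan extracting maximal runs of kept characters, space-joined.
--     '''
--     if not isinstance(text, str):
--         return ""
--     stop = set(string.punctuation + string.digits)
--     tokens = []
--     i, n = 0, len(text)
--     while i < n:
--         if text[i].isspace() or text[i] in stop:
--             i += 1
--         else:
--             j = i
--             while j < n and not (text[j].isspace() or text[j] in stop):
--                 j += 1
--             tokens.append(text[i:j].lower())
--             i = j
--     return " ".join(tokens)
-- ===== Notes on version B (the rewrite author's own statement) =====
-- stated objective: alternative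
-- what changed: A maps every character to space-or-lowercase into a new string and then re-splits and joins it; B does one scan over the original text extracting maximal runs of kept (non-whitespace, non-punctuation, non-digit) characters and space-joins their lowercased slices, never building the intermediate replaced string.
import Mathlib
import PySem

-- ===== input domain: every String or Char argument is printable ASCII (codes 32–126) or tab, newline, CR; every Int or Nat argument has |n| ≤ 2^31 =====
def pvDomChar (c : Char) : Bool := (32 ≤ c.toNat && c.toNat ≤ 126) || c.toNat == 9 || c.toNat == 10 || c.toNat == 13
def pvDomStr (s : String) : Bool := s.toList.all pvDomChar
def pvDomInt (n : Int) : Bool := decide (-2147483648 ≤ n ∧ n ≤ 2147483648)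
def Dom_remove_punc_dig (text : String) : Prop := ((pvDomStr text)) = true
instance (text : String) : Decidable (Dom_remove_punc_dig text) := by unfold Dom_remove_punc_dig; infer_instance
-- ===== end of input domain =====

-- B replaces A's per-character replace-then-split loop by a single scan that
-- extracts maximal runs of kept characters and space-joins them lowercased
-- (objective: alternative decomposition; return value only, no side effects).

-- ===== PORT A =====
-- string.punctuation + string.digits
def pvToRemove : List Char := "!\"#$%&'()*+,-./:;<=>?@[\\]^_`{|}~0123456789".toList

def remove_punc_dig (text : String) : String :=
  -- for i in range(len(text)): cur_text += " " if removable else text[i].lower()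
  let cur := text.toList.foldl
    (fun acc c => acc ++ [if pvToRemove.contains c then ' ' else PySem.Chars.lowerChar c]) []
  -- " ".join(cur_text.split())
  PySem.Str.join " " (PySem.Str.split₀ (String.ofList cur))

-- ===== PORT B =====
-- a character survives iff it is neither whitespace nor punctuation/digit
def pvKeep (c : Char) : Bool := !PySem.Chars.isspace c && !pvToRemove.contains c

-- the scanning loop of Source B: maximal runs of characters satisfying p
def pvRuns (p : Char → Bool) : List Char → List (List Char)
  | [] => []
  | c :: rest =>
    if p c then (c :: rest.takeWhile p) :: pvRuns p (rest.dropWhile p)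
    else pvRuns p rest
termination_by cs => cs.length
decreasing_by
  · exact Nat.lt_succ_of_le (List.length_dropWhile_le p rest)
  · simp

def remove_punc_dig_alt (text : String) : String :=
  String.ofList (PySem.Chars.join [' ']
    ((pvRuns pvKeep text.toList).map PySem.Chars.lower))

-- ===== PRECONDITION & SPEC =====
def Spec_remove_punc_dig (text : String) (out : String) : Prop := out = remove_punc_dig_alt text
instance (text : String) (out : String) : Decidable (Spec_remove_punc_dig text out) := by unfold Spec_remove_punc_dig; infer_instance

-- ===== CLAIM (what is proved, stated in full; the proofs are below) =====
def Claim_equal_remove_punc_dig : Prop := ∀ (text : String), Dom_remove_punc_dig text → Spec_remove_punc_dig text (remove_punc_dig text)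

-- ===== LEMMAS AND PROOFS =====

-- A's character transform
def pvF (c : Char) : Char := if pvToRemove.contains c then ' ' else PySem.Chars.lowerChar c

-- non-whitespace predicate used by str.split()
def pvW (c : Char) : Bool := !PySem.Chars.isspace c

lemma pvFoldl_append (cs : List Char) (acc : List Char) :
    cs.foldl (fun acc c => acc ++ [pvF c]) acc = acc ++ cs.map pvF := by
  induction cs generalizing acc with
  | nil => simp
  | cons c rest ih => simp [List.foldl_cons, ih]

lemma pvIsspace_lowerChar (c : Char) :
    PySem.Chars.isspace (PySem.Chars.lowerChar c) = PySem.Chars.isspace c := by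
  unfold PySem.Chars.lowerChar
  split
  · rename_i h
    unfold PySem.Chars.isupper at h
    simp only [Bool.and_eq_true, decide_eq_true_eq] at h
    have h1 : 65 ≤ c.toNat := h.1
    have h2 : c.toNat ≤ 90 := h.2
    have hv : (c.toNat + 32).isValidChar := by left; omega
    have e1 : PySem.Chars.isspace (Char.ofNat (c.toNat + 32)) = false := by
      unfold PySem.Chars.isspace
      rw [Char.toNat_ofNat, if_pos hv]
      simp only [Bool.or_eq_false_iff, Bool.and_eq_false_iff, decide_eq_false_iff_not]
      omega
    have e2 : PySem.Chars.isspace c = false := by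
      unfold PySem.Chars.isspace
      simp only [Bool.or_eq_false_iff, Bool.and_eq_false_iff, decide_eq_false_iff_not]
      omega
    rw [e1, e2]
  · rfl

lemma pvW_pvF (c : Char) : pvW (pvF c) = pvKeep c := by
  unfold pvW pvF pvKeep
  by_cases h : c ∈ pvToRemove
  · have hsp : PySem.Chars.isspace ' ' = true := by decide
    simp [h, hsp]
  · simp [h, pvIsspace_lowerChar]

lemma pvF_of_keep (c : Char) (h : pvKeep c = true) : pvF c = PySem.Chars.lowerChar c := by
  unfold pvKeep at h
  simp only [Bool.and_eq_true, Bool.not_eq_true'] at h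
  unfold pvF
  rw [h.2]
  simp

lemma pvSplit0_go_eq (ds : List Char) :
    ∀ (cur : List Char) (acc : List (List Char)),
    PySem.Chars.split₀.go ds cur acc =
      acc.reverse ++
        (if cur = [] then pvRuns pvW ds
         else (cur.reverse ++ ds.takeWhile pvW) :: pvRuns pvW (ds.dropWhile pvW)) := by
  induction ds with
  | nil =>
    intro cur acc
    rw [PySem.Chars.split₀.go.eq_def]
    by_cases h : cur = []
    · simp [h, pvRuns]
    · simp [h, List.isEmpty_iff, pvRuns]
  | cons c rest ih =>
    intro cur acc
    by_cases hs : PySem.Chars.isspace c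
    · have hw : pvW c = false := by simp [pvW, hs]
      by_cases h : cur = []
      · rw [show PySem.Chars.split₀.go (c :: rest) cur acc =
              PySem.Chars.split₀.go rest [] acc from by
            conv_lhs => rw [PySem.Chars.split₀.go.eq_def]
            simp [hs, h], ih]
        simp [h, pvRuns, hw]
      · rw [show PySem.Chars.split₀.go (c :: rest) cur acc =
              PySem.Chars.split₀.go rest [] (cur.reverse :: acc) from by
            conv_lhs => rw [PySem.Chars.split₀.go.eq_def]
            simp [hs, h, List.isEmpty_iff], ih]
        simp [h, pvRuns, hw]
    · have hw : pvW c = true := by simp [pvW, hs]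
      rw [show PySem.Chars.split₀.go (c :: rest) cur acc =
            PySem.Chars.split₀.go rest (c :: cur) acc from by
          conv_lhs => rw [PySem.Chars.split₀.go.eq_def]
          simp [hs], ih]
      by_cases h : cur = []
      · simp [h, pvRuns, hw]
      · simp [h, hw]

lemma pvSplit0_eq_runs (ds : List Char) :
    PySem.Chars.split₀ ds = pvRuns pvW ds := by
  unfold PySem.Chars.split₀
  rw [pvSplit0_go_eq]
  simp

lemma pvTakeWhile_congr (p q : Char → Bool) (l : List Char) (h : ∀ c ∈ l, p c = q c) :
    l.takeWhile p = l.takeWhile q := by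
  induction l with
  | nil => rfl
  | cons c rest ih =>
    have hc := h c (by simp)
    simp only [List.takeWhile_cons, hc]
    split
    · rw [ih (fun x hx => h x (by simp [hx]))]
    · rfl

lemma pvDropWhile_congr (p q : Char → Bool) (l : List Char) (h : ∀ c ∈ l, p c = q c) :
    l.dropWhile p = l.dropWhile q := by
  induction l with
  | nil => rfl
  | cons c rest ih =>
    have hc := h c (by simp)
    simp only [List.dropWhile_cons, hc]
    split
    · exact ih (fun x hx => h x (by simp [hx]))
    · rfl

lemma pvRuns_map (cs : List Char) :
    pvRuns pvW (cs.map pvF) = (pvRuns pvKeep cs).map (List.map PySem.Chars.lowerChar) := by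
  induction cs using pvRuns.induct (p := pvKeep) with
  | case1 => simp [pvRuns]
  | case2 c rest hk ih =>
    have hw : pvW (pvF c) = true := by rw [pvW_pvF]; exact hk
    have hco : ∀ x ∈ rest, (pvW ∘ pvF) x = pvKeep x := fun x _ => pvW_pvF x
    rw [List.map_cons, pvRuns, pvRuns, if_pos hw, if_pos hk]
    rw [List.takeWhile_map, List.dropWhile_map,
        pvTakeWhile_congr _ pvKeep rest hco, pvDropWhile_congr _ pvKeep rest hco, ih]
    rw [List.map_cons]
    congr 1
    rw [List.map_cons, pvF_of_keep c hk]
    congr 1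
    apply List.map_congr_left
    intro x hx
    exact pvF_of_keep x (List.mem_takeWhile_imp hx)
  | case3 c rest hk ih =>
    have hw : ¬ pvW (pvF c) = true := by rw [pvW_pvF]; exact hk
    rw [List.map_cons, pvRuns, pvRuns, if_neg hw, if_neg hk]
    exact ih

lemma pvLower_eq (t : List Char) : PySem.Chars.lower t = t.map PySem.Chars.lowerChar := rfl

-- ===== VERDICT (by name: the statement is the Claim_ definition above) =====
theorem remove_punc_dig_spec : Claim_equal_remove_punc_dig := by
  intro text _
  unfold Spec_remove_punc_dig remove_punc_dig remove_punc_dig_alt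
  have hfold : text.toList.foldl
      (fun acc c => acc ++ [if pvToRemove.contains c then ' ' else PySem.Chars.lowerChar c]) []
      = text.toList.map pvF := by
    have := pvFoldl_append text.toList []
    simpa [pvF] using this
  rw [hfold]
  unfold PySem.Str.join PySem.Str.split₀
  simp only [String.toList_ofList, List.map_map]
  rw [pvSplit0_eq_runs, pvRuns_map]
  have hsep : (" " : String).toList = [' '] := rfl
  rw [hsep]
  congr 1
  congr 1
  rw [List.map_map]
  apply List.map_congr_left
  intro t _
  simp [Function.comp, pvLower_eq]
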